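-- pv_equiv track=rewrite | github.com/garciparedes/binarysearch | problems/1009_view_over_people.py | solve
-- ===== SOURCE A (Python) =====
-- def solve(heights, k):
--     ans = list()
--     queue = list()
--     for i in reversed(range(len(heights))):
--         height = heights[i]
--
--         if len(queue) > k:
--             queue.pop(0)
--
--         while queue and queue[0] < height:
--             queue.pop(0)
--
--         if not queue:
--             ans.append(i)
--
--         queue.append(height)
--
--     return ans[::-1]
-- ===== SOURCE B (Python) =====
-- def solve(heights, k):
--     n = len(heights)
--     ans = []
--     for i in range(n):
--         if all(heights[j] < heights[i] for j in range(i + 1, min(n, i + 1 + k))):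
--             ans.append(i)
--     return ans
-- ===== Notes on version B (the rewrite author's own statement) =====
-- stated objective: simpler
-- what changed: Replaced the backward scan with a mutating bounded monotonic queue by a direct forward scan that tests each index against its next-k window with all(); the queue, its trimming and the final reversal disappear.
import Mathlib
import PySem

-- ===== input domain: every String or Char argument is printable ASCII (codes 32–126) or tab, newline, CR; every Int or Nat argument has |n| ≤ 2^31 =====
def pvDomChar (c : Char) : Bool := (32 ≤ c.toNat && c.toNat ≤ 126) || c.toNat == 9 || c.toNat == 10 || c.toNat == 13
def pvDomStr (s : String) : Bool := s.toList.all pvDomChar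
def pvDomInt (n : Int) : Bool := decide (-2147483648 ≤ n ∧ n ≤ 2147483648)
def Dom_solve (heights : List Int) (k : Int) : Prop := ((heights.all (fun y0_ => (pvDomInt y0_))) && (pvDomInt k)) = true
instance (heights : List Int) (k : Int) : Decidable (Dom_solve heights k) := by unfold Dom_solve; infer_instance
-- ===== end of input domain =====

-- B replaces A's backward scan with a bounded monotonic queue by a direct forward
-- scan testing each index against its next-k window; same return value on Pre_.

-- ===== PORT A =====
-- 'while queue and queue[0] < height: queue.pop(0)'
def popWhileA (height : Int) : List Int → List Int
  | [] => []
  | q :: rest => if q < height then popWhileA height rest else q :: rest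

def stepA (heights : List Int) (k : Int) (st : List Int × List Int) (i : Int) : List Int × List Int :=
  let height := PySem.List.pyGetD heights i 0  -- i comes from range(len(heights)): always in range
  -- 'if len(queue) > k: queue.pop(0)' — pop(0) on an empty queue (k < 0) raises: excluded by Pre_
  let queue1 := if ((st.2.length : Int) > k) then st.2.drop 1 else st.2
  let queue2 := popWhileA height queue1
  let ans' := if queue2.isEmpty then st.1 ++ [i] else st.1
  (ans', queue2 ++ [height])

def solve (heights : List Int) (k : Int) : List Int :=
  -- 'for i in reversed(range(len(heights)))' ; 'ans[::-1]' is reversal (PySem.List.slice?_none_none_neg_one)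
  (((PySem.List.pyRange 0 heights.length 1).reverse).foldl (stepA heights k) ([], [])).1.reverse

-- ===== PORT B =====
def solve_alt (heights : List Int) (k : Int) : List Int :=
  let n : Int := heights.length
  (PySem.List.pyRange 0 n 1).foldl (fun ans i =>
    if (PySem.List.pyRange (i + 1) (min n (i + 1 + k)) 1).all
        (fun j => PySem.List.pyGetD heights j 0 < PySem.List.pyGetD heights i 0)
    then ans ++ [i] else ans) []

-- ===== PRECONDITION & SPEC =====
-- Pre_ excludes exactly the inputs on which A raises: nonempty heights with k < 0
-- make 'queue.pop(0)' fire on an empty queue (IndexError).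
def Pre_solve (heights : List Int) (k : Int) : Prop := heights = [] ∨ 0 ≤ k
instance (heights : List Int) (k : Int) : Decidable (Pre_solve heights k) := by unfold Pre_solve; infer_instance
def pvWitness_solve : List Int × Int := ([3, 1, 2, 2], 1)

def Spec_solve (heights : List Int) (k : Int) (out : List Int) : Prop := out = solve_alt heights k
instance (heights : List Int) (k : Int) (out : List Int) : Decidable (Spec_solve heights k out) := by unfold Spec_solve; infer_instance

-- ===== CLAIM (what is proved, stated in full; the proofs are below) =====
def Claim_equal_solve : Prop := ∀ (heights : List Int) (k : Int), Dom_solve heights k → Pre_solve heights k → Spec_solve heights k (solve heights k)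

-- ===== LEMMAS AND PROOFS =====

-- 'index i has a clear view': every j in its next-k window is strictly lower
def goodb (heights : List Int) (k : Int) (i : Nat) : Bool :=
  decide (∀ j, j < heights.length → i < j → (j : Int) ≤ (i : Int) + k → heights.getD j 0 < heights.getD i 0)

-- A's queue after processing index a, when its front index is b-1: heights over [a, b), front = b-1
def qList (heights : List Int) (a b : Nat) : List Int :=
  ((List.range' a (b - a)).reverse).map (fun j => heights.getD j 0)

lemma qList_self (heights : List Int) (a : Nat) : qList heights a a = [] := by
  simp [qList]

lemma qList_cons (heights : List Int) (a b : Nat) (h : a < b) :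
    qList heights a b = heights.getD (b - 1) 0 :: qList heights a (b - 1) := by
  unfold qList
  have h1 : b - a = (b - 1 - a) + 1 := by omega
  have h2 : a + (b - 1 - a) = b - 1 := by omega
  rw [h1, List.range'_concat]
  simp only [one_mul, h2]
  simp

lemma qList_append (heights : List Int) (i e : Nat) (h : i < e) :
    qList heights (i + 1) e ++ [heights.getD i 0] = qList heights i e := by
  unfold qList
  have h1 : e - i = (e - (i + 1)) + 1 := by omega
  rw [h1, List.range'_succ]
  simp

lemma qList_length (heights : List Int) (a b : Nat) : (qList heights a b).length = b - a := by
  simp [qList]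

lemma qList_eq_nil_iff (heights : List Int) (a b : Nat) : qList heights a b = [] ↔ b ≤ a := by
  simp [qList, List.range'_eq_nil_iff]; omega

lemma qList_drop_one (heights : List Int) (a b : Nat) (h : a < b) :
    (qList heights a b).drop 1 = qList heights a (b - 1) := by
  rw [qList_cons heights a b h]; rfl

lemma popWhileA_cons (H q : Int) (rest : List Int) :
    popWhileA H (q :: rest) = if q < H then popWhileA H rest else q :: rest := rfl

lemma popWhileA_char (heights : List Int) (H : Int) :
    ∀ (b a : Nat), a ≤ b →
    ∃ c, a ≤ c ∧ c ≤ b ∧ popWhileA H (qList heights a b) = qList heights a c ∧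
      (∀ j, c ≤ j → j < b → heights.getD j 0 < H) ∧
      (a < c → ¬ heights.getD (c - 1) 0 < H) := by
  intro b
  induction b with
  | zero =>
    intro a ha
    refine ⟨0, by omega, by omega, ?_, by omega, by omega⟩
    have : a = 0 := by omega
    subst this
    simp [qList_self, popWhileA]
  | succ b ih =>
    intro a ha
    by_cases hab : a = b + 1
    · subst hab
      exact ⟨b + 1, le_refl _, le_refl _, by simp [qList_self, popWhileA], by omega, by omega⟩
    · have hlt : a < b + 1 := by omega
      rw [qList_cons heights a (b + 1) hlt]
      simp only [Nat.add_sub_cancel]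
      by_cases hpop : heights.getD b 0 < H
      · obtain ⟨c, hc1, hc2, hc3, hc4, hc5⟩ := ih a (by omega)
        refine ⟨c, hc1, by omega, ?_, ?_, hc5⟩
        · rw [popWhileA_cons, if_pos hpop, hc3]
        · intro j hj1 hj2
          by_cases hjb : j = b
          · subst hjb; exact hpop
          · exact hc4 j hj1 (by omega)
      · refine ⟨b + 1, by omega, le_refl _, ?_, by omega, ?_⟩
        · rw [popWhileA_cons, if_neg hpop, qList_cons heights a (b + 1) hlt]
          simp only [Nat.add_sub_cancel]
        · intro _; exact hpop

lemma drop_range_eq (m n : Nat) : (List.range n).drop m = List.range' m (n - m) := by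
  rw [List.range_eq_range', List.drop_range']
  simp

-- the downward-loop invariant of A: after processing indices [n-d, n), the answer so far is the
-- reversed good-list of that suffix and the queue is heights over [n-d, e) for some e, with
-- every later window index j dominated by some queue index t
lemma invA (heights : List Int) (k : Int) (hk : 0 ≤ k) :
    ∀ (d : Nat), d ≤ heights.length →
    ∃ e, (heights.length - d) ≤ e ∧ e ≤ heights.length ∧
      (e : Int) ≤ ((heights.length - d : Nat) : Int) + k + 1 ∧
      (d ≠ 0 → heights.length - d < e) ∧
      ((((List.range heights.length).drop (heights.length - d)).reverse.map Int.ofNat).foldl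
          (stepA heights k) ([], []))
        = ((((List.range' (heights.length - d) d).filter (goodb heights k)).map Int.ofNat).reverse,
            qList heights (heights.length - d) e) ∧
      (∀ j, e ≤ j → j < heights.length → (j : Int) ≤ ((heights.length - d : Nat) : Int) - 1 + k →
        ∃ t, heights.length - d ≤ t ∧ t < e ∧ t < j ∧ heights.getD j 0 < heights.getD t 0) := by
  intro d
  induction d with
  | zero =>
    intro _
    refine ⟨heights.length, by omega, le_refl _, by omega, by omega, ?_, by omega⟩
    simp only [Nat.sub_zero]
    rw [qList_self]
    simp [List.drop_eq_nil_of_le]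
  | succ d ih =>
    intro hd
    obtain ⟨e, he1, he2, he3, he4, he5, he6⟩ := ih (by omega)
    set n := heights.length with hn
    set i := n - (d + 1) with hi
    have hi1 : n - d = i + 1 := by omega
    have hin : i < n := by omega
    rw [hi1] at he1 he3 he5 he6
    -- peel off index i from the processed suffix
    have hdrop : ((List.range n).drop i).reverse.map Int.ofNat
        = (((List.range n).drop (i + 1)).reverse.map Int.ofNat) ++ [Int.ofNat i] := by
      rw [drop_range_eq, drop_range_eq]
      have : List.range' i (n - i) = i :: List.range' (i + 1) (n - (i + 1)) := by
        have h1 : n - i = (n - (i + 1)) + 1 := by omega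
        rw [h1, List.range'_succ]
      rw [this]
      simp
    rw [hdrop, List.foldl_append, List.foldl_cons, List.foldl_nil, he5]
    -- compute the step at index i
    have hheight : PySem.List.pyGetD heights (Int.ofNat i) 0 = heights.getD i 0 := by
      simp
    -- trimmed front bound e'
    set e' : Nat := if ((e - (i + 1) : Nat) : Int) > k then e - 1 else e with he'
    have he'1 : i + 1 ≤ e' := by
      by_cases htrim : ((e - (i + 1) : Nat) : Int) > k
      · simp only [he', if_pos htrim]; omega
      · simp only [he', if_neg htrim]; omega
    have he'2 : e' ≤ e := by
      by_cases htrim : ((e - (i + 1) : Nat) : Int) > k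
      · simp only [he', if_pos htrim]; omega
      · simp only [he', if_neg htrim]; omega
    have he'3 : (e' : Int) ≤ (i : Int) + 1 + k := by
      by_cases htrim : ((e - (i + 1) : Nat) : Int) > k
      · simp only [he', if_pos htrim]; push_cast at htrim ⊢; omega
      · simp only [he', if_neg htrim]; push_cast at htrim ⊢; omega
    have he'eq : e' < e → e' = e - 1 := by
      intro hlt
      by_cases htrim : ((e - (i + 1) : Nat) : Int) > k
      · simp only [he', if_pos htrim]
      · rw [he', if_neg htrim] at hlt; omega
    -- if a trim happened, the trimmed index e-1 is beyond i's window
    have htrimfar : e' < e → (i : Int) + k + 1 ≤ ((e - 1 : Nat) : Int) := by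
      intro hlt
      by_cases htrim : ((e - (i + 1) : Nat) : Int) > k
      · push_cast at htrim ⊢; omega
      · simp only [he', if_neg htrim] at hlt; omega
    have hqueue1 : (if (((qList heights (i + 1) e).length : Int) > k)
        then (qList heights (i + 1) e).drop 1 else qList heights (i + 1) e)
        = qList heights (i + 1) e' := by
      rw [qList_length]
      by_cases htrim : ((e - (i + 1) : Nat) : Int) > k
      · rw [if_pos htrim, qList_drop_one heights (i + 1) e (by omega), he', if_pos htrim]
      · rw [if_neg htrim, he', if_neg htrim]
    obtain ⟨c, hc1, hc2, hc3, hc4, hc5⟩ := popWhileA_char heights (heights.getD i 0) e' (i + 1) he'1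
    -- emptiness of the popped queue  ⟺  i has a clear view
    have hgood : (goodb heights k i = true) ↔ c = i + 1 := by
      unfold goodb
      rw [decide_eq_true_eq]
      constructor
      · intro hg
        by_contra hne
        have hcgt : i + 1 < c := by omega
        have := hc5 hcgt
        exact this (hg (c - 1) (by omega) (by omega) (by omega))
      · intro hc
        subst hc
        intro j hjn hij hjk
        by_cases hje' : j < e'
        · exact hc4 j (by omega) hje'
        · by_cases hje : j < e
          · have hlt : e' < e := by omega
            have h1 := htrimfar hlt
            have h2 := he'eq hlt
            omega
          · obtain ⟨t, ht1, ht2, ht3, ht4⟩ := he6 j (by omega) hjn (by push_cast at hjk ⊢; omega)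
            have hte' : t < e' := by
              by_cases hlt : e' < e
              · have h1 := htrimfar hlt
                have h2 := he'eq hlt
                omega
              · omega
            calc heights.getD j 0 < heights.getD t 0 := ht4
              _ < heights.getD i 0 := hc4 t ht1 hte'
    refine ⟨c, by omega, by omega, by omega, fun _ => by omega, ?_, ?_⟩
    · -- the new state
      show stepA heights k _ (Int.ofNat i) = _
      unfold stepA
      simp only [hheight, hqueue1, hc3]
      have hrange : List.range' i (d + 1) = i :: List.range' (i + 1) d := by
        rw [List.range'_succ]
      rw [hrange]
      have hq1 : qList heights i (i + 1) = [heights.getD i 0] := by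
        rw [qList_cons heights i (i + 1) (by omega)]
        simp only [Nat.add_sub_cancel]
        rw [qList_self]
      by_cases hg : goodb heights k i = true
      · have hc : c = i + 1 := hgood.mp hg
        subst hc
        rw [List.filter_cons_of_pos hg, qList_self]
        simp [hq1]
      · have hc : ¬ c = i + 1 := fun h => hg (hgood.mpr h)
        have hcne : qList heights (i + 1) c ≠ [] := by
          rw [Ne, qList_eq_nil_iff]; omega
        rw [List.filter_cons_of_neg hg]
        rw [if_neg (by simpa [List.isEmpty_iff] using hcne)]
        rw [qList_append heights i c (by omega)]
    · -- the new domination invariant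
      intro j hj1 hj2 hj3
      by_cases hje' : j < e'
      · exact ⟨i, le_refl _, by omega, by omega, hc4 j hj1 hje'⟩
      · by_cases hje : j < e
        · have hlt : e' < e := by omega
          have h1 := htrimfar hlt
          have h2 := he'eq hlt
          omega
        · obtain ⟨t, ht1, ht2, ht3, ht4⟩ := he6 j (by omega) hj2 (by push_cast at hj3 ⊢; omega)
          by_cases htc : t < c
          · exact ⟨t, by omega, htc, ht3, ht4⟩
          · have hte' : t < e' := by
              by_cases hlt : e' < e
              · have h1 := htrimfar hlt
                have h2 := he'eq hlt
                omega
              · omega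
            refine ⟨i, le_refl _, by omega, by omega, ?_⟩
            calc heights.getD j 0 < heights.getD t 0 := ht4
              _ < heights.getD i 0 := hc4 t (by omega) hte'

-- characterisation of A
lemma solveChar (heights : List Int) (k : Int) (hk : 0 ≤ k) :
    solve heights k = ((List.range heights.length).filter (goodb heights k)).map Int.ofNat := by
  obtain ⟨e, _, _, _, _, h5, _⟩ := invA heights k hk heights.length (le_refl _)
  simp only [Nat.sub_self, List.drop_zero] at h5
  unfold solve
  have hr : PySem.List.pyRange 0 (heights.length : Int) 1
      = (List.range heights.length).map Int.ofNat := by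
    simpa using PySem.List.pyRange_zero_nat heights.length
  rw [hr, ← List.map_reverse, h5]
  rw [List.reverse_reverse]
  congr 1
  rw [List.range_eq_range']

-- characterisation of B (any k)
lemma condB (heights : List Int) (k : Int) (i : Nat) :
    ((PySem.List.pyRange ((Int.ofNat i) + 1) (min (heights.length : Int) ((Int.ofNat i) + 1 + k)) 1).all
      (fun j => PySem.List.pyGetD heights j 0 < PySem.List.pyGetD heights (Int.ofNat i) 0))
    = goodb heights k i := by
  rw [Bool.eq_iff_iff, List.all_eq_true]
  unfold goodb
  rw [decide_eq_true_eq]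
  simp only [decide_eq_true_eq]
  constructor
  · intro H j hjn hij hjk
    have hmem : (j : Int) ∈ PySem.List.pyRange ((Int.ofNat i) + 1)
        (min (heights.length : Int) ((Int.ofNat i) + 1 + k)) 1 := by
      rw [PySem.List.mem_pyRange_one]
      refine ⟨?_, ?_⟩
      · simp only [Int.ofNat_eq_natCast]; omega
      · simp only [Int.ofNat_eq_natCast, lt_min_iff]; omega
    have := H _ hmem
    simpa using this
  · intro H j hjmem
    rw [PySem.List.mem_pyRange_one] at hjmem
    obtain ⟨hj1, hj2⟩ := hjmem
    have hj0 : 0 ≤ j := by simp only [Int.ofNat_eq_natCast] at hj1; omega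
    obtain ⟨jn, rfl⟩ := Int.eq_ofNat_of_zero_le hj0
    simp only [Int.ofNat_eq_natCast, lt_min_iff] at hj1 hj2
    have := H jn (by omega) (by omega) (by omega)
    simpa using this

lemma altChar (heights : List Int) (k : Int) :
    solve_alt heights k = ((List.range heights.length).filter (goodb heights k)).map Int.ofNat := by
  unfold solve_alt
  have hr : PySem.List.pyRange 0 (heights.length : Int) 1
      = (List.range heights.length).map Int.ofNat := by
    simpa using PySem.List.pyRange_zero_nat heights.length
  simp only [hr]
  rw [List.foldl_map]
  refine (PySem.List.foldl_congr_mem (List.range heights.length) _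
    (fun (ans : List Int) (i : Nat) => if goodb heights k i then ans ++ [Int.ofNat i] else ans)
    [] ?_).trans ?_
  · intro acc i _
    simp only [condB heights k i]
  · rw [PySem.List.foldl_append_if]
    simp

-- ===== VERDICT (by name: the statement is the Claim_ definition above) =====
theorem solve_spec : Claim_equal_solve := by
  intro heights k _ hpre
  unfold Spec_solve
  rcases hpre with hnil | hk
  · subst hnil
    rw [altChar]
    have h0 : PySem.List.pyRange 0 (0 : Int) 1 = [] :=
      PySem.List.pyRange_one_eq_nil (le_refl 0)
    simp [solve, h0]
  · rw [solveChar heights k hk, altChar heights k]
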